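-- pv_equiv track=rewrite | github.com/lshwa/Algorithm | 프로그래머스/0/181837. 커피 심부름/커피 심부름.py | solution
-- ===== SOURCE A (Python) =====
-- def solution(order):
--     answer = 0
--
--     for coffee in order:
--         if 'cafe' in coffee:
--             answer += 5000
--         else:
--             answer += 4500
--
--     return answer
-- ===== SOURCE B (Python) =====
-- def solution(order):
--     # Divide and conquer: total of a list = total of its left half + total of
--     # its right half; single-element base case prices that order directly.
--     if not order:
--         return 0
--     if len(order) == 1:
--         return 5000 if 'cafe' in order[0] else 4500
--     mid = len(order) // 2
--     return solution(order[:mid]) + solution(order[mid:])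
-- ===== Notes on version B (the rewrite author's own statement) =====
-- stated objective: alternative
-- what changed: B replaces A's left-to-right loop with a running accumulator by a divide-and-conquer recursion: the total of a list is the total of its left half plus the total of its right half, pricing a single order only at the base case.
import Mathlib
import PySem

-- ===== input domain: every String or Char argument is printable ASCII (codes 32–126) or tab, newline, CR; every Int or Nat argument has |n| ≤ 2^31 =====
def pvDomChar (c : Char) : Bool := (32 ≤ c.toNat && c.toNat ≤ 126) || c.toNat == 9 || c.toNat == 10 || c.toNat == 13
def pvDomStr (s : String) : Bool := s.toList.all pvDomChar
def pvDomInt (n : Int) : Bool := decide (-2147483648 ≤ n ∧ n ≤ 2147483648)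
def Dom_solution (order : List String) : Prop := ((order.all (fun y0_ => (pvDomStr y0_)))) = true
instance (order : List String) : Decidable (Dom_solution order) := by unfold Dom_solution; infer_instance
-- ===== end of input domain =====

-- B: divide-and-conquer over list halves instead of A's left-to-right loop with an accumulator (alternative decomposition).

-- ===== PORT A =====
def solution (order : List String) : Int :=
  order.foldl (fun answer coffee =>
    if PySem.Str.isIn "cafe" coffee then answer + 5000 else answer + 4500) 0

-- ===== PORT B =====
def solution_alt (order : List String) : Int :=
  if h0 : order = [] then 0
  else if h1 : order.length = 1 then
    (if PySem.Str.isIn "cafe" order.headI then (5000:Int) else 4500)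
  else
    let mid := order.length / 2
    -- order[:mid] / order[mid:] with natural in-range bounds = take / drop (PySem.List.slice_to_natCast / slice_from_natCast)
    solution_alt (order.take mid) + solution_alt (order.drop mid)
termination_by order.length
decreasing_by
  · have : order.length ≠ 0 := fun h => h0 (List.length_eq_zero_iff.mp h)
    simp only [List.length_take]; omega
  · have : order.length ≠ 0 := fun h => h0 (List.length_eq_zero_iff.mp h)
    simp only [List.length_drop]; omega

-- ===== PRECONDITION & SPEC =====
def Spec_solution (order : List String) (out : Int) : Prop := out = solution_alt order
instance (order : List String) (out : Int) : Decidable (Spec_solution order out) := by unfold Spec_solution; infer_instance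

-- ===== CLAIM (what is proved, stated in full; the proofs are below) =====
def Claim_equal_solution : Prop := ∀ (order : List String), Dom_solution order → Spec_solution order (solution order)

-- ===== LEMMAS AND PROOFS =====
def pvPrice (s : String) : Int := if PySem.Str.isIn "cafe" s then 5000 else 4500

theorem solution_foldl_shift (t : List String) (a : Int) :
    t.foldl (fun answer coffee =>
      if PySem.Str.isIn "cafe" coffee then answer + 5000 else answer + 4500) a
    = a + (t.map pvPrice).sum := by
  induction t generalizing a with
  | nil => simp
  | cons h t ih =>
    simp only [List.foldl_cons, List.map_cons, List.sum_cons, pvPrice]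
    rw [ih]
    split_ifs <;> ring

theorem alt_eq_sum (n : Nat) : ∀ l : List String, l.length ≤ n →
    solution_alt l = (l.map pvPrice).sum := by
  induction n with
  | zero =>
    intro l hl
    have : l = [] := List.length_eq_zero_iff.mp (Nat.le_zero.mp hl)
    subst this
    simp [solution_alt]
  | succ n ih =>
    intro l hl
    rw [solution_alt]
    by_cases h0 : l = []
    · subst h0; simp
    · rw [dif_neg h0]
      by_cases h1 : l.length = 1
      · obtain ⟨x, rfl⟩ := List.length_eq_one_iff.mp h1
        simp [pvPrice]
      · rw [dif_neg h1]
        show solution_alt (l.take (l.length / 2)) + solution_alt (l.drop (l.length / 2)) = _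
        have hlen : 2 ≤ l.length := by
          have := List.length_pos_iff.mpr h0; omega
        rw [ih (l.take (l.length / 2)) (by simp; omega),
            ih (l.drop (l.length / 2)) (by simp; omega)]
        rw [← List.sum_append, ← List.map_append, List.take_append_drop]

-- ===== VERDICT (by name: the statement is the Claim_ definition above) =====
theorem solution_spec : Claim_equal_solution := by
  intro order _
  show solution order = solution_alt order
  unfold solution
  rw [solution_foldl_shift, alt_eq_sum order.length order le_rfl]
  ring
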